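-- pv_equiv track=rewrite | github.com/mariamfathallah/blackjack-python | src/blackjack.py | gagnant
-- ===== SOURCE A (Python) =====
-- def gagnant(scores):
--     """cette fonction nous permet de savoir le gagnant et son score"""
--     diff_dict = {}
--     max_1 = 21
--     max_joueur = None
--     for k,v in scores.items():
--         if v <= 21 and 21-v <= max_1:
--             max_1 = 21-v
--             max_joueur = k
--     if max_joueur == None:
--         return 'personne',0
--     else:
--         return max_joueur,scores[max_joueur]
-- ===== SOURCE B (Python) =====
-- def gagnant(scores):
--     """cette fonction nous permet de savoir le gagnant et son score"""
--     candidates = [(k, v) for k, v in scores.items() if 0 <= v <= 21]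
--     if not candidates:
--         return 'personne', 0
--     return sorted(candidates, key=lambda kv: kv[1])[-1]
-- ===== Notes on version B (the rewrite author's own statement) =====
-- stated objective: idiomatic
-- what changed: Replaces the running best-difference loop plus final dict re-lookup with a filter of the 0..21 candidates and a stable ascending sort whose last element is the last-inserted maximum; Pre_ excludes association lists with duplicate keys, which cannot arise from a Python dict argument.
import Mathlib
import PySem

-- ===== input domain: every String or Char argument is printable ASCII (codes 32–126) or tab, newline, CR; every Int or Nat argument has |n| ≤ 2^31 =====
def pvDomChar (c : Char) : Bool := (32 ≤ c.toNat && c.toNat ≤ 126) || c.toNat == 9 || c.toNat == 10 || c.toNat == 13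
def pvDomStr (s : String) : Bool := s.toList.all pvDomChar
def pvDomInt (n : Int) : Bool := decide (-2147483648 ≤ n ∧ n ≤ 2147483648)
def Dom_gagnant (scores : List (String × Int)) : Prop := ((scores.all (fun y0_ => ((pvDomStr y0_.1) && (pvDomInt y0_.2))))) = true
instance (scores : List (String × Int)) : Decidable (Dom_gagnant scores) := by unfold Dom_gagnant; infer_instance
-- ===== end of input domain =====

-- B replaces A's running best-difference loop and final dict re-lookup by filtering the
-- 0..21 candidates and taking the last element of a stable ascending sort (idiomatic; not faster).

-- ===== PORT A =====
def gagnant (scores : List (String × Int)) : String × Int :=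
  -- diff_dict = {} is created and never used; max_1 = 21; max_joueur = None; then the loop.
  let st := scores.foldl
    (fun (acc : Int × Option String) kv =>
      if kv.2 ≤ 21 ∧ 21 - kv.2 ≤ acc.1 then (21 - kv.2, some kv.1) else acc)
    ((21 : Int), (none : Option String))
  match st.2 with
  | none => ("personne", 0)
  | some k => (k, ((PySem.Dict.mk scores).get? k).getD 0)
    -- scores[max_joueur]: the key came from the loop, so it is present and the default 0 is unreachable

-- ===== PORT B =====
def gagnant_alt (scores : List (String × Int)) : String × Int :=
  let candidates := scores.filter (fun kv => decide (0 ≤ kv.2) && decide (kv.2 ≤ 21))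
  if candidates = [] then ("personne", 0)
  else
    (PySem.List.pyGet? (PySem.List.sorted candidates (fun kv => kv.2) false) (-1)).getD
      ("personne", 0)  -- candidates ≠ [], so [-1] is in range and the default is unreachable

-- ===== PRECONDITION & SPEC =====
-- Pre_ requires distinct keys: the association list stands for a Python dict, whose keys are
-- necessarily distinct; on duplicate keys A's final scores[k] re-lookup is ill-defined.
def Pre_gagnant (scores : List (String × Int)) : Prop := (scores.map Prod.fst).Nodup
instance (scores : List (String × Int)) : Decidable (Pre_gagnant scores) := by
  unfold Pre_gagnant; infer_instance
def pvWitness_gagnant : (List (String × Int)) :=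
  [("alice", 19), ("bob", 22), ("carol", 19), ("dan", -3)]
def Spec_gagnant (scores : List (String × Int)) (out : String × Int) : Prop := out = gagnant_alt scores
instance (scores : List (String × Int)) (out : String × Int) : Decidable (Spec_gagnant scores out) := by unfold Spec_gagnant; infer_instance

-- ===== CLAIM (what is proved, stated in full; the proofs are below) =====
def Claim_equal_gagnant : Prop := ∀ (scores : List (String × Int)), Dom_gagnant scores → Pre_gagnant scores → Spec_gagnant scores (gagnant scores)

-- ===== LEMMAS AND PROOFS =====

-- A's loop step, named for the proofs
def stepA (acc : Int × Option String) (kv : String × Int) : Int × Option String :=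
  if kv.2 ≤ 21 ∧ 21 - kv.2 ≤ acc.1 then (21 - kv.2, some kv.1) else acc

def candPred (kv : String × Int) : Bool := decide (0 ≤ kv.2) && decide (kv.2 ≤ 21)

-- the last element of B's sorted candidate list
def lastSorted (l : List (String × Int)) : Option (String × Int) :=
  (PySem.List.sorted (l.filter candPred) (fun kv => kv.2) false).getLast?

lemma gagnant_eq_foldl (scores : List (String × Int)) :
    gagnant scores =
      match (scores.foldl stepA ((21 : Int), (none : Option String))).2 with
      | none => ("personne", 0)
      | some k => (k, ((PySem.Dict.mk scores).get? k).getD 0) := rfl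

lemma insertBy_ne_nil {α : Type} (b : α → α → Bool) (x : α) (ys : List α) :
    PySem.List.insertBy b x ys ≠ [] := by
  cases ys with
  | nil => simp [PySem.List.insertBy]
  | cons y ys => by_cases h : b x y <;> simp [PySem.List.insertBy, h]

lemma insertBy_getLast? {α : Type} (b : α → α → Bool) (x : α) (ys : List α) :
    (PySem.List.insertBy b x ys).getLast? =
      if ys.any (b x) then ys.getLast? else some x := by
  induction ys with
  | nil => simp [PySem.List.insertBy]
  | cons y ys ih =>
    by_cases h : b x y
    · simp [PySem.List.insertBy, h]
    · cases ys with
      | nil => simp [PySem.List.insertBy, h]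
      | cons z zs =>
        have hstep : PySem.List.insertBy b x (y :: z :: zs)
            = y :: PySem.List.insertBy b x (z :: zs) := by
          simp [PySem.List.insertBy, h]
        rw [hstep]
        obtain ⟨w, t, hwt⟩ : ∃ w t, PySem.List.insertBy b x (z :: zs) = w :: t := by
          cases hE : PySem.List.insertBy b x (z :: zs) with
          | nil => exact absurd hE (insertBy_ne_nil b x (z :: zs))
          | cons w t => exact ⟨w, t, rfl⟩
        rw [hwt, List.getLast?_cons_cons, ← hwt, ih]
        simp [List.any_cons, h]

lemma pairwise_getLast_max (l : List (String × Int)) (m : String × Int)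
    (hp : l.Pairwise (fun a b => a.2 ≤ b.2)) (hl : l.getLast? = some m) :
    ∀ y ∈ l, y.2 ≤ m.2 := by
  induction l with
  | nil => simp at hl
  | cons a t ih =>
    cases t with
    | nil =>
      simp at hl; subst hl; simp
    | cons b u =>
      rw [List.getLast?_cons_cons] at hl
      have hp' := (List.pairwise_cons.mp hp)
      intro y hy
      rcases List.mem_cons.mp hy with rfl | hy'
      · have hm : m ∈ b :: u := List.mem_of_getLast? hl
        exact hp'.1 m hm
      · exact ih hp'.2 hl y hy'

lemma get?_mk_of_mem_nodup (scores : List (String × Int)) (k : String) (v : Int)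
    (hn : (scores.map Prod.fst).Nodup) (hm : (k, v) ∈ scores) :
    (PySem.Dict.mk scores).get? k = some v := by
  induction scores with
  | nil => simp at hm
  | cons a t ih =>
    rw [List.map_cons, List.nodup_cons] at hn
    rcases List.mem_cons.mp hm with rfl | hm'
    · simp [PySem.Dict.get?_mk_cons]
    · rw [PySem.Dict.get?_mk_cons]
      have hne : a.1 ≠ k := by
        intro h; exact hn.1 (h ▸ List.mem_map.mpr ⟨(k, v), hm', rfl⟩)
      simp only [beq_iff_eq, hne, if_false]
      exact ih hn.2 hm'

lemma mem_of_lastSorted (l : List (String × Int)) (m : String × Int)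
    (h : lastSorted l = some m) : m ∈ l ∧ candPred m := by
  have hm := List.mem_of_getLast? h
  rw [PySem.List.mem_sorted] at hm
  exact ⟨List.mem_of_mem_filter hm, List.of_mem_filter hm⟩

lemma lastSorted_max (l : List (String × Int)) (m : String × Int)
    (h : lastSorted l = some m) :
    ∀ y ∈ PySem.List.sorted (l.filter candPred) (fun kv => kv.2) false, y.2 ≤ m.2 :=
  pairwise_getLast_max _ m (PySem.List.sorted_pairwise _ _) h

-- the invariant: A's loop state is determined by the last element of B's sorted candidate list
lemma foldl_eq_lastSorted (l : List (String × Int)) :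
    l.foldl stepA ((21 : Int), (none : Option String)) =
      match lastSorted l with
      | none => ((21 : Int), (none : Option String))
      | some kv => (21 - kv.2, some kv.1) := by
  induction l using List.reverseRecOn with
  | nil => simp [lastSorted, PySem.List.sorted]
  | append_singleton l x ih =>
    rw [List.foldl_append, List.foldl_cons, List.foldl_nil, ih]
    by_cases hx : candPred x
    · -- x is a candidate: it is inserted into the sorted list
      have hfilt : (l ++ [x]).filter candPred = l.filter candPred ++ [x] := by
        simp [List.filter_append, hx]
      have hsorted : PySem.List.sorted ((l ++ [x]).filter candPred) (fun kv => kv.2) false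
          = PySem.List.insertBy (fun a b => decide (a.2 < b.2)) x
              (PySem.List.sorted (l.filter candPred) (fun kv => kv.2) false) := by
        rw [hfilt, PySem.List.sorted_eq_foldl_insertBy, List.foldl_append,
          ← PySem.List.sorted_eq_foldl_insertBy]
        simp
      have hx' : 0 ≤ x.2 ∧ x.2 ≤ 21 := by simpa [candPred] using hx
      have hx0 : 0 ≤ x.2 := hx'.1
      have hx21 : x.2 ≤ 21 := hx'.2
      cases hls : lastSorted l with
      | none =>
        have hls' : (PySem.List.sorted (l.filter candPred) (fun kv => kv.2) false).getLast?
            = none := hls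
        have hnil : PySem.List.sorted (l.filter candPred) (fun kv => kv.2) false = [] :=
          List.getLast?_eq_none_iff.mp hls'
        simp only [lastSorted, hsorted, hnil]
        simp [stepA, hx0, hx21, PySem.List.insertBy]
      | some m =>
        have hmax := lastSorted_max l m hls
        have hls' : (PySem.List.sorted (l.filter candPred) (fun kv => kv.2) false).getLast?
            = some m := hls
        simp only [lastSorted, hsorted]
        rw [insertBy_getLast?]
        by_cases hcmp : m.2 ≤ x.2
        · -- x becomes the new last (ties go to the later element, as in A)
          have hany : (PySem.List.sorted (l.filter candPred) (fun kv => kv.2) false).any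
              (fun y => decide (x.2 < y.2)) = false := by
            simp only [List.any_eq_false]
            intro y hy
            have := hmax y hy
            simp; omega
          rw [hany]
          simp [stepA, hx21]
          omega
        · -- x is strictly smaller: the last element is unchanged
          have hmem : m ∈ PySem.List.sorted (l.filter candPred) (fun kv => kv.2) false :=
            List.mem_of_getLast? hls
          have hany : (PySem.List.sorted (l.filter candPred) (fun kv => kv.2) false).any
              (fun y => decide (x.2 < y.2)) = true := by
            simp only [List.any_eq_true]
            exact ⟨m, hmem, by simp; omega⟩
          rw [hany]
          simp only [hls']
          simp [stepA]
          omega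
    · -- x is not a candidate: both the loop state and the candidate list are unchanged
      have hfilt : (l ++ [x]).filter candPred = l.filter candPred := by
        simp [List.filter_append, hx]
      have hlast : lastSorted (l ++ [x]) = lastSorted l := by
        simp [lastSorted, hfilt]
      rw [hlast]
      have hxrange : x.2 < 0 ∨ 21 < x.2 := by
        by_contra h
        push Not at h
        exact hx (by simp [candPred]; omega)
      cases hls : lastSorted l with
      | none => simp [stepA]; omega
      | some m =>
        have hm21 : 0 ≤ m.2 := by
          have := (mem_of_lastSorted l m hls).2
          simp [candPred] at this; omega
        simp [stepA]; omega

-- ===== VERDICT (by name: the statement is the Claim_ definition above) =====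
theorem gagnant_spec : Claim_equal_gagnant := by
  intro scores _ hpre
  unfold Spec_gagnant
  rw [gagnant_eq_foldl, foldl_eq_lastSorted]
  unfold gagnant_alt
  cases hls : lastSorted scores with
  | none =>
    have hls' : (PySem.List.sorted (scores.filter candPred) (fun kv => kv.2) false).getLast?
        = none := hls
    have hnil : scores.filter (fun kv => decide (0 ≤ kv.2) && decide (kv.2 ≤ 21)) = [] := by
      have h2 : PySem.List.sorted (scores.filter candPred) (fun kv => kv.2) false = [] :=
        List.getLast?_eq_none_iff.mp hls'
      rw [PySem.List.sorted_eq_nil_iff] at h2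
      exact h2
    simp [hnil]
  | some m =>
    obtain ⟨hmem, hcp⟩ := mem_of_lastSorted scores m hls
    have hne : scores.filter (fun kv => decide (0 ≤ kv.2) && decide (kv.2 ≤ 21)) ≠ [] := by
      intro h
      have : (candPred m) = true := hcp
      have hmf : m ∈ scores.filter candPred := List.mem_filter.mpr ⟨hmem, hcp⟩
      rw [show (candPred : (String × Int) → Bool)
          = (fun kv => decide (0 ≤ kv.2) && decide (kv.2 ≤ 21)) from rfl, h] at hmf
      simp at hmf
    rw [if_neg hne]
    have hsame : scores.filter (fun kv => decide (0 ≤ kv.2) && decide (kv.2 ≤ 21))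
        = scores.filter candPred := rfl
    rw [hsame, PySem.List.pyGet?_neg_one]
    rw [show (PySem.List.sorted (scores.filter candPred) (fun kv => kv.2) false).getLast?
        = some m from hls]
    have hget := get?_mk_of_mem_nodup scores m.1 m.2 hpre hmem
    simp [hget]
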